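-- pv_equiv track=rewrite | github.com/sadiayousafzai036/CodalitySolutions | CountSemiPrimes.py | partialSemiprime
-- ===== SOURCE A (Python) =====
-- def primeSieve(N):
--     # first assume that numbers from 0 to N are all prime numbers
--     prime_sieve = [True] * (N + 1)
--     # special case
--     prime_sieve[0] = prime_sieve[1] = False
--     # algorithm to find numbers that are not prime numbers
--     i = 2
--     while (i * i <= N):
--         if prime_sieve[i]:
--             k = i * i
--             while (k <= N):
--                 prime_sieve[k] = False
--                 k += i
--         i += 1
--
--     return prime_sieve
--
-- def partialSemiprime(N):
--     prime_sieve = primeSieve(N)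
--     # primes vector to store all the prime numbers
--     primes = []
--     for i in range(len(prime_sieve)):
--         if prime_sieve[i]:
--             primes.append(i)
--
--     # first assume that numbers from 0 to N are NOT semiprime numbers
--     semiprime_sieve = [False] * (N + 1)
--     for i in range(len(primes)):
--         if (i * i > N):
--             break
--         for j in range(i, len(primes)):
--             if primes[i] * primes[j] > N:
--                 break
--             semiprime_sieve[primes[i] * primes[j]] = True
--
--     partial_semiprime = []
--     count = 0
--     for x in semiprime_sieve:
--         if x:
--             count += 1
--         partial_semiprime.append(count)
--
--     return partial_semiprime
-- ===== SOURCE B (Python) =====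
-- def partialSemiprime(N):
--     sieve = [True] * (N + 1)
--     sieve[0] = sieve[1] = False
--     for i in range(2, N + 1):
--         if i * i > N:
--             break
--         if sieve[i]:
--             for k in range(i * i, N + 1, i):
--                 sieve[k] = False
--     out = []
--     count = 0
--     for x in range(N + 1):
--         if not sieve[x]:
--             p = 2
--             while p * p <= x:
--                 if x % p == 0:
--                     if sieve[x // p]:
--                         count += 1
--                     break
--                 p += 1
--         out.append(count)
--     return out
-- ===== Notes on version B (the rewrite author's own statement) =====
-- stated objective: alternative
-- what changed: kept the boolean prime sieve but replaced A's prime-list extraction and double loop over prime pairs by a per-number classification: x is counted iff x is sieve-composite and its smallest divisor p (with p*p <= x) has a prime cofactor x//p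
-- outside the precondition, e.g. on partialSemiprime(0): A raises IndexError, B raises IndexError
import Mathlib
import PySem

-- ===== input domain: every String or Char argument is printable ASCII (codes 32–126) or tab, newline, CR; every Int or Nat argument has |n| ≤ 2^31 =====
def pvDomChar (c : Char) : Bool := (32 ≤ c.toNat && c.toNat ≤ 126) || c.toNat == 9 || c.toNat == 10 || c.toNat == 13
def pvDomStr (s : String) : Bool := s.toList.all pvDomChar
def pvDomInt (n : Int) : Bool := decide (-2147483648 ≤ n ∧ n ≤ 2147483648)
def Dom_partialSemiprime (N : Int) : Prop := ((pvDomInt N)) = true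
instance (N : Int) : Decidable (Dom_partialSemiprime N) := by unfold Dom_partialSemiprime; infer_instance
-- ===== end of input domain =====

-- B keeps A's boolean prime sieve but replaces the prime-list extraction and the double
-- loop over prime pairs by a direct per-number classification (x is semiprime iff some
-- prime p with p*p <= x divides x with prime cofactor x//p); alternative algorithm, not faster.

-- ===== PORT A =====

-- inner `while k <= N: prime_sieve[k] = False; k += i` (the `2 ≤ i` conjunct is a
-- termination guard only; every call site has i ≥ 2)
def sieveInnerA (N i k : Int) (s : List Bool) : List Bool :=
  if h : k ≤ N ∧ 2 ≤ i then sieveInnerA N i (k + i) (s.set k.toNat false) else s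
termination_by (N + 1 - k).toNat
decreasing_by omega

-- outer `while i*i <= N: ...; i += 1` (again `2 ≤ i` is a termination guard only)
def sieveOuterA (N i : Int) (s : List Bool) : List Bool :=
  if h : i * i ≤ N ∧ 2 ≤ i then
    sieveOuterA N (i + 1) (if s.getD i.toNat false then sieveInnerA N i (i * i) s else s)
  else s
termination_by (N + 1 - i).toNat
decreasing_by
  have hii : i ≤ i * i := le_mul_of_one_le_left (by omega) (by omega)
  omega

def primeSieveA (N : Int) : List Bool :=
  sieveOuterA N 2 (((List.replicate (N + 1).toNat true).set 0 false).set 1 false)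

-- `for i in range(len(prime_sieve)): if prime_sieve[i]: primes.append(i)`
def collectPrimesA (s : List Bool) : List Nat :=
  (List.range s.length).foldl (fun acc i => if s.getD i false then acc ++ [i] else acc) []

-- inner `for j in range(i, len(primes)): if primes[i]*primes[j] > N: break; mark`
def pairInnerA (N : Int) (primes : List Nat) (p j : Nat) (sem : List Bool) : List Bool :=
  if h : j < primes.length then
    if ((p * primes.getD j 0 : Nat) : Int) ≤ N then
      pairInnerA N primes p (j + 1) (sem.set (p * primes.getD j 0) true)
    else sem
  else sem
termination_by primes.length - j

-- outer `for i in range(len(primes)): if i*i > N: break; inner`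
def pairOuterA (N : Int) (primes : List Nat) (i : Nat) (sem : List Bool) : List Bool :=
  if h : i < primes.length then
    if ((i * i : Nat) : Int) ≤ N then
      pairOuterA N primes (i + 1) (pairInnerA N primes (primes.getD i 0) i sem)
    else sem
  else sem
termination_by primes.length - i

-- `for x in semiprime_sieve: if x: count += 1; partial_semiprime.append(count)`
def prefixCountA (count : Int) : List Bool → List Int
  | [] => []
  | x :: rest =>
    let c := if x then count + 1 else count
    c :: prefixCountA c rest

def partialSemiprime (N : Int) : List Int :=
  let s := primeSieveA N
  let primes := collectPrimesA s
  let sem := pairOuterA N primes 0 (List.replicate (N + 1).toNat false)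
  prefixCountA 0 sem

-- ===== PORT B =====

-- `for k in range(i*i, N+1, i): sieve[k] = False`
def sieveInnerB (N i : Int) (s : List Bool) : List Bool :=
  (PySem.List.pyRange (i * i) (N + 1) i).foldl (fun t k => t.set k.toNat false) s

-- `for i in range(2, N+1): if i*i > N: break; if sieve[i]: inner`
def sieveOuterB (N i : Int) (s : List Bool) : List Bool :=
  if h : 2 ≤ i ∧ i ≤ N then
    if i * i ≤ N then
      sieveOuterB N (i + 1) (if s.getD i.toNat false then sieveInnerB N i s else s)
    else s
  else s
termination_by (N + 1 - i).toNat

def sieveB (N : Int) : List Bool :=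
  sieveOuterB N 2 (((List.replicate (N + 1).toNat true).set 0 false).set 1 false)

-- `while p*p <= x: if x % p == 0: (count += sieve[x//p]); break; p += 1`
-- (the `2 ≤ p` conjunct is a termination guard only; the loop starts at p = 2)
def semiCheckB (x : Int) (s : List Bool) (p : Int) : Bool :=
  if h : p * p ≤ x ∧ 2 ≤ p then
    if PySem.Int.mod x p == 0 then s.getD (PySem.Int.floordiv x p).toNat false
    else semiCheckB x s (p + 1)
  else false
termination_by (x + 1 - p).toNat
decreasing_by
  have hpp : p ≤ p * p := le_mul_of_one_le_left (by omega) (by omega)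
  omega

-- `for x in range(N+1): if not sieve[x]: <divisor scan>; out.append(count)`
def outLoopB (N : Int) (s : List Bool) (x count : Int) : List Int :=
  if h : x ≤ N then
    let c := if !(s.getD x.toNat false) && semiCheckB x s 2 then count + 1 else count
    c :: outLoopB N s (x + 1) c
  else []
termination_by (N + 1 - x).toNat

def partialSemiprime_alt (N : Int) : List Int :=
  outLoopB N (sieveB N) 0 0

-- ===== PRECONDITION & SPEC =====
-- Python A raises IndexError for N ≤ 0 (writing prime_sieve[0]/prime_sieve[1] into a
-- list of length N+1 ≤ 1); Pre_ excludes exactly those inputs.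
def Pre_partialSemiprime (N : Int) : Prop := 1 ≤ N
instance (N : Int) : Decidable (Pre_partialSemiprime N) := by unfold Pre_partialSemiprime; infer_instance
def pvWitness_partialSemiprime : Int := (30)

def Spec_partialSemiprime (N : Int) (out : List Int) : Prop := out = partialSemiprime_alt N
instance (N : Int) (out : List Int) : Decidable (Spec_partialSemiprime N out) := by unfold Spec_partialSemiprime; infer_instance

-- ===== CLAIM (what is proved, stated in full; the proofs are below) =====
def Claim_equal_partialSemiprime : Prop := ∀ (N : Int), Dom_partialSemiprime N → Pre_partialSemiprime N → Spec_partialSemiprime N (partialSemiprime N)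

-- ===== LEMMAS AND PROOFS =====

-- getD after set
theorem getD_set' (l : List Bool) (i j : Nat) (a : Bool) :
    (l.set i a).getD j false = if i = j ∧ i < l.length then a else l.getD j false := by
  rw [List.getD_eq_getElem?_getD, List.getD_eq_getElem?_getD, List.getElem?_set]
  by_cases h1 : i = j
  · subst h1
    by_cases h2 : i < l.length <;> simp [h2]
  · simp [h1]

-- cons/nil unfolding of a positive-step range
theorem pyRange_pos_nil (a b s : Int) (hs : 0 < s) (h : b ≤ a) :
    PySem.List.pyRange a b s = [] := by
  rw [PySem.List.pyRange_of_pos _ _ hs]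
  simp [show ¬ a < b by omega]

theorem pyRange_pos_cons (a b s : Int) (hs : 0 < s) (h : a < b) :
    PySem.List.pyRange a b s = a :: PySem.List.pyRange (a + s) b s := by
  rw [PySem.List.pyRange_of_pos _ _ hs, PySem.List.pyRange_of_pos _ _ hs]
  have hn : (b - a + s - 1) / s = (b - a - 1) / s + 1 := by
    have h1 : b - a + s - 1 = (b - a - 1) + 1 * s := by ring
    rw [h1, Int.add_mul_ediv_right _ _ (by omega)]
  have hm : 0 ≤ (b - a - 1) / s := Int.ediv_nonneg (by omega) (by omega)
  simp only [if_pos h]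
  by_cases h2 : a + s < b
  · have hn' : b - (a + s) + s - 1 = b - a - 1 := by ring
    simp only [if_pos h2, hn', hn]
    have ht : ((b - a - 1) / s + 1).toNat = ((b - a - 1) / s).toNat + 1 := by omega
    rw [ht, List.range_succ_eq_map]
    simp only [List.map_cons, List.map_map]
    congr 1
    · simp
    · refine List.map_congr_left ?_
      intro x _
      simp only [Function.comp_apply]
      push_cast
      ring
  · simp only [if_neg h2, hn]
    have h0 : (b - a - 1) / s = 0 := Int.ediv_eq_zero_of_lt (by omega) (by omega)
    rw [h0]
    simp

-- ---- Phase 1: the two sieves compute the same array ----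
theorem sieveInnerA_eq_foldl (N i : Int) (hi : 2 ≤ i) (k : Int) (s : List Bool) :
    sieveInnerA N i k s = (PySem.List.pyRange k (N + 1) i).foldl (fun t k => t.set k.toNat false) s := by
  rw [sieveInnerA]
  by_cases h : k ≤ N
  · rw [dif_pos ⟨h, hi⟩, pyRange_pos_cons _ _ _ (by omega) (by omega), List.foldl_cons]
    exact sieveInnerA_eq_foldl N i hi (k + i) (s.set k.toNat false)
  · rw [dif_neg (by omega), pyRange_pos_nil _ _ _ (by omega) (by omega), List.foldl_nil]
termination_by (N + 1 - k).toNat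
decreasing_by omega

theorem sieveOuter_eq (N : Int) (i : Int) (s : List Bool) (hi : 2 ≤ i) :
    sieveOuterB N i s = sieveOuterA N i s := by
  rw [sieveOuterB, sieveOuterA]
  by_cases h : i * i ≤ N
  · have hiN : i ≤ N := le_trans (le_mul_of_one_le_left (by omega) (by omega)) h
    rw [dif_pos ⟨hi, hiN⟩, if_pos h, dif_pos ⟨h, hi⟩]
    rw [sieveOuter_eq N (i + 1) _ (by omega)]
    congr 1
    by_cases hb : s.getD i.toNat false
    · simp only [hb, if_true, sieveInnerB]
      exact (sieveInnerA_eq_foldl N i hi (i * i) s).symm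
    · rw [if_neg hb, if_neg hb]
  · have hA : ¬ (i * i ≤ N ∧ 2 ≤ i) := fun hc => h hc.1
    by_cases h2 : 2 ≤ i ∧ i ≤ N
    · rw [dif_pos h2, if_neg h, dif_neg hA]
    · rw [dif_neg h2, dif_neg hA]
termination_by (N + 1 - i).toNat
decreasing_by
  have hii : i ≤ i * i := le_mul_of_one_le_left (by omega) (by omega)
  omega

theorem sieveB_eq (N : Int) : sieveB N = primeSieveA N :=
  sieveOuter_eq N 2 _ (by omega)

-- ---- Phase 2: structural facts about the sieve array ----
theorem length_sieveInnerA (N i k : Int) (s : List Bool) :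
    (sieveInnerA N i k s).length = s.length := by
  rw [sieveInnerA]
  split
  · rw [length_sieveInnerA]; simp
  · rfl
termination_by (N + 1 - k).toNat
decreasing_by omega

theorem length_sieveOuterA (N i : Int) (s : List Bool) :
    (sieveOuterA N i s).length = s.length := by
  rw [sieveOuterA]
  split
  · rename_i h
    rw [length_sieveOuterA]
    split <;> simp [length_sieveInnerA]
  · rfl
termination_by (N + 1 - i).toNat
decreasing_by
  rename_i h
  have hii : i ≤ i * i := le_mul_of_one_le_left (by omega) (by omega)
  omega

theorem length_primeSieveA (N : Int) : (primeSieveA N).length = (N + 1).toNat := by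
  rw [primeSieveA, length_sieveOuterA]; simp

theorem false_sieveInnerA (N i : Int) (j : Nat) (k : Int) (s : List Bool)
    (h : s.getD j false = false) : (sieveInnerA N i k s).getD j false = false := by
  rw [sieveInnerA]
  split
  · apply false_sieveInnerA
    rw [getD_set']
    split
    · rfl
    · exact h
  · exact h
termination_by (N + 1 - k).toNat
decreasing_by omega

theorem false_sieveOuterA (N : Int) (j : Nat) (i : Int) (s : List Bool)
    (h : s.getD j false = false) : (sieveOuterA N i s).getD j false = false := by
  rw [sieveOuterA]
  split
  · apply false_sieveOuterA
    split
    · exact false_sieveInnerA N i j _ s h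
    · exact h
  · exact h
termination_by (N + 1 - i).toNat
decreasing_by
  rename_i h'
  have hii : i ≤ i * i := le_mul_of_one_le_left (by omega) (by omega)
  omega

theorem init_sieve_getD_fin (N : Int) (j : Nat) (hj : j ≤ 1) :
    ((((List.replicate (N + 1).toNat true).set 0 false).set 1 false)).getD j false = false := by
  rw [getD_set', getD_set']
  simp only [List.length_set, List.length_replicate]
  split
  · rfl
  split
  · rfl
  rename_i h1 h0
  have hn : (N + 1).toNat ≤ j := by
    rcases Nat.lt_or_ge j (N + 1).toNat with hlt | hge
    · interval_cases j
      · exact absurd ⟨rfl, hlt⟩ h0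
      · exact absurd ⟨rfl, hlt⟩ h1
    · exact hge
  rw [List.getD_eq_getElem?_getD, List.getElem?_eq_none (by simpa using hn)]
  rfl

theorem primeSieveA_zero (N : Int) : (primeSieveA N).getD 0 false = false :=
  false_sieveOuterA N 0 2 _ (init_sieve_getD_fin N 0 (by omega))

theorem primeSieveA_one (N : Int) : (primeSieveA N).getD 1 false = false :=
  false_sieveOuterA N 1 2 _ (init_sieve_getD_fin N 1 (by omega))

-- getD = true forces the index in range
theorem getD_true_lt (s : List Bool) (j : Nat) (h : s.getD j false = true) : j < s.length := by
  by_contra hc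
  rw [List.getD_eq_getElem?_getD, List.getElem?_eq_none (by omega)] at h
  simp at h

-- ---- Phase 3: the primes list ----
theorem collectPrimesA_eq (s : List Bool) :
    collectPrimesA s = (List.range s.length).filter (fun i => s.getD i false) := by
  rw [collectPrimesA, PySem.List.foldl_append_if_eq_filter]
  simp

theorem mem_collectPrimesA (s : List Bool) (p : Nat) :
    p ∈ collectPrimesA s ↔ p < s.length ∧ s.getD p false = true := by
  rw [collectPrimesA_eq, List.mem_filter]
  simp [List.mem_range]

theorem collectPrimesA_sorted (s : List Bool) : (collectPrimesA s).Pairwise (· < ·) := by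
  rw [collectPrimesA_eq]
  exact (List.pairwise_lt_range).filter _

-- in a strictly increasing Nat list every element dominates its index
theorem sorted_idx_le_aux (l : List Nat) (hl : l.Pairwise (· < ·)) (c : Nat)
    (hc : ∀ y ∈ l, c ≤ y) : ∀ i, i < l.length → c + i ≤ l.getD i 0 := by
  induction l generalizing c with
  | nil => intro i h; simp at h
  | cons a t ih =>
    intro i hi
    cases i with
    | zero => simpa using hc a (by simp)
    | succ i =>
      have ht : t.Pairwise (· < ·) := hl.of_cons
      have ha : ∀ y ∈ t, a + 1 ≤ y := by
        intro y hy
        have := (List.pairwise_cons.mp hl).1 y hy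
        omega
      have := ih ht (a + 1) ha i (by simpa using hi)
      have hca : c ≤ a := hc a (by simp)
      simp only [List.getD_cons_succ]
      omega

theorem sorted_idx_le (l : List Nat) (hl : l.Pairwise (· < ·)) :
    ∀ i, i < l.length → i ≤ l.getD i 0 := by
  intro i hi
  simpa using sorted_idx_le_aux l hl 0 (by simp) i hi

theorem sorted_getD_mono (l : List Nat) (hl : l.Pairwise (· < ·)) (i j : Nat)
    (hij : i ≤ j) (hj : j < l.length) : l.getD i 0 ≤ l.getD j 0 := by
  rcases Nat.eq_or_lt_of_le hij with rfl | hlt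
  · rfl
  · have := List.pairwise_iff_getElem.mp hl i j (by omega) hj hlt
    rw [List.getD_eq_getElem l 0 (by omega), List.getD_eq_getElem l 0 hj]
    omega

-- ---- Phase 4: what the pair loops mark ----
theorem length_pairInnerA (N : Int) (primes : List Nat) (p j : Nat) (sem : List Bool) :
    (pairInnerA N primes p j sem).length = sem.length := by
  rw [pairInnerA]
  split
  · split
    · rw [length_pairInnerA]; simp
    · rfl
  · rfl
termination_by primes.length - j

theorem length_pairOuterA (N : Int) (primes : List Nat) (i : Nat) (sem : List Bool) :
    (pairOuterA N primes i sem).length = sem.length := by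
  rw [pairOuterA]
  split
  · split
    · rw [length_pairOuterA, length_pairInnerA]
    · rfl
  · rfl
termination_by primes.length - i

theorem pairInnerA_getD (N : Int) (primes : List Nat) (hs : primes.Pairwise (· < ·)) (p x : Nat)
    (j0 : Nat) (sem : List Bool) (hx : x < sem.length) :
    ((pairInnerA N primes p j0 sem).getD x false = true ↔
      sem.getD x false = true ∨ ∃ j, j0 ≤ j ∧ j < primes.length ∧
        ((p * primes.getD j 0 : Nat) : Int) ≤ N ∧ p * primes.getD j 0 = x) := by
  rw [pairInnerA]
  by_cases hj : j0 < primes.length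
  · rw [dif_pos hj]
    by_cases hle : ((p * primes.getD j0 0 : Nat) : Int) ≤ N
    · rw [if_pos hle]
      rw [pairInnerA_getD N primes hs p x (j0 + 1) _ (by simpa using hx)]
      rw [getD_set']
      constructor
      · rintro (h | ⟨j, hj1, hj2, hj3, hj4⟩)
        · split at h
          · rename_i hc
            exact Or.inr ⟨j0, le_refl _, hj, hle, hc.1⟩
          · exact Or.inl h
        · exact Or.inr ⟨j, by omega, hj2, hj3, hj4⟩
      · rintro (h | ⟨j, hj1, hj2, hj3, hj4⟩)
        · left
          split
          · rfl
          · exact h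
        · rcases Nat.eq_or_lt_of_le hj1 with rfl | hlt
          · left
            rw [if_pos ⟨hj4, by rw [hj4]; exact hx⟩]
          · exact Or.inr ⟨j, by omega, hj2, hj3, hj4⟩
    · rw [if_neg hle]
      constructor
      · exact Or.inl
      · rintro (h | ⟨j, hj1, hj2, hj3, hj4⟩)
        · exact h
        · exfalso
          have hmono := sorted_getD_mono primes hs j0 j hj1 hj2
          have hm2 : (p * primes.getD j0 0 : Nat) ≤ p * primes.getD j 0 :=
            Nat.mul_le_mul_left _ hmono
          have hc : ((p * primes.getD j0 0 : Nat) : Int) ≤ ((p * primes.getD j 0 : Nat) : Int) := by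
            exact_mod_cast hm2
          omega
  · rw [dif_neg hj]
    constructor
    · exact Or.inl
    · rintro (h | ⟨j, hj1, hj2, _, _⟩)
      · exact h
      · omega
termination_by primes.length - j0

theorem pairOuterA_getD (N : Int) (primes : List Nat) (hs : primes.Pairwise (· < ·)) (x : Nat)
    (i0 : Nat) (sem : List Bool) (hx : x < sem.length) :
    ((pairOuterA N primes i0 sem).getD x false = true ↔
      sem.getD x false = true ∨ ∃ i j, i0 ≤ i ∧ i ≤ j ∧ j < primes.length ∧
        ((primes.getD i 0 * primes.getD j 0 : Nat) : Int) ≤ N ∧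
        primes.getD i 0 * primes.getD j 0 = x) := by
  rw [pairOuterA]
  by_cases hi : i0 < primes.length
  · rw [dif_pos hi]
    by_cases hle : ((i0 * i0 : Nat) : Int) ≤ N
    · rw [if_pos hle]
      rw [pairOuterA_getD N primes hs x (i0 + 1) _ (by rw [length_pairInnerA]; exact hx)]
      rw [pairInnerA_getD N primes hs (primes.getD i0 0) x i0 sem hx]
      constructor
      · rintro ((h | ⟨j, h1, h2, h3, h4⟩) | ⟨i, j, h1, h2, h3, h4, h5⟩)
        · exact Or.inl h
        · exact Or.inr ⟨i0, j, le_refl _, h1, h2, h3, h4⟩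
        · exact Or.inr ⟨i, j, by omega, h2, h3, h4, h5⟩
      · rintro (h | ⟨i, j, h1, h2, h3, h4, h5⟩)
        · exact Or.inl (Or.inl h)
        · rcases Nat.eq_or_lt_of_le h1 with rfl | hlt
          · exact Or.inl (Or.inr ⟨j, h2, h3, h4, h5⟩)
          · exact Or.inr ⟨i, j, by omega, h2, h3, h4, h5⟩
    · rw [if_neg hle]
      constructor
      · exact Or.inl
      · rintro (h | ⟨i, j, h1, h2, h3, h4, h5⟩)
        · exact h
        · exfalso
          have hidx : i ≤ primes.getD i 0 := sorted_idx_le primes hs i (by omega)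
          have hmono : primes.getD i 0 ≤ primes.getD j 0 :=
            sorted_getD_mono primes hs i j h2 h3
          have hm2 : (i0 * i0 : Nat) ≤ primes.getD i 0 * primes.getD j 0 :=
            Nat.mul_le_mul (by omega) (by omega)
          have hc : ((i0 * i0 : Nat) : Int) ≤ ((primes.getD i 0 * primes.getD j 0 : Nat) : Int) := by
            exact_mod_cast hm2
          omega
  · rw [dif_neg hi]
    constructor
    · exact Or.inl
    · rintro (h | ⟨i, j, h1, h2, h3, _, _⟩)
      · exact h
      · omega
termination_by primes.length - i0


-- ---- Phase 5: correctness of the sieve array (marked ↔ has a small divisor) ----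

-- m has no divisor d with 2 ≤ d and d*d ≤ m (true exactly for 0, 1 and the primes)
def noSmallDiv (m : Nat) : Prop := ∀ d : Nat, 2 ≤ d → d * d ≤ m → ¬ d ∣ m

theorem sieveInnerA_unchanged (N i : Int) (hi : 2 ≤ i) (m : Nat) (k : Int) (hk : 0 ≤ k)
    (s : List Bool) (hm : ¬(k ≤ (m : Int) ∧ i ∣ ((m : Int) - k))) :
    (sieveInnerA N i k s).getD m false = s.getD m false := by
  rw [sieveInnerA]
  split
  · rw [sieveInnerA_unchanged N i hi m (k + i) (by omega) _ ?hnext, getD_set']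
    case hnext =>
      rintro ⟨h1, h2⟩
      exact hm ⟨by omega, by
        have : (m : Int) - k = ((m : Int) - (k + i)) + i := by ring
        rw [this]
        exact dvd_add h2 dvd_rfl⟩
    split
    · rename_i hc
      exfalso
      have hkm : k = (m : Int) := by omega
      exact hm ⟨by omega, by rw [hkm]; simp⟩
    · rfl
  · rfl
termination_by (N + 1 - k).toNat
decreasing_by omega

theorem sieveInnerA_hits (N i : Int) (hi : 2 ≤ i) (m : Nat) (k : Int) (hk : 0 ≤ k)
    (s : List Bool) (h1 : k ≤ (m : Int)) (h2 : i ∣ ((m : Int) - k)) (h3 : (m : Int) ≤ N)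
    (hlen : m < s.length) : (sieveInnerA N i k s).getD m false = false := by
  rw [sieveInnerA, dif_pos ⟨by omega, hi⟩]
  by_cases hkm : k = (m : Int)
  · apply false_sieveInnerA
    rw [getD_set']
    rw [if_pos ⟨by omega, by omega⟩]
  · have hklt : k + i ≤ (m : Int) := by
      rcases h2 with ⟨t, ht⟩
      have hmk : 0 < (m : Int) - k := by omega
      have ht0 : 1 ≤ t := by
        by_contra hc
        push_neg at hc
        have hnp : i * t ≤ 0 := mul_nonpos_of_nonneg_of_nonpos (by omega) (by omega)
        omega
      have hit : i ≤ i * t := le_mul_of_one_le_right (by omega) ht0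
      omega
    apply sieveInnerA_hits N i hi m (k + i) (by omega) _ hklt (by
      have : (m : Int) - (k + i) = ((m : Int) - k) - i := by ring
      rw [this]
      exact dvd_sub h2 dvd_rfl) h3 (by simpa using hlen)
termination_by (N + 1 - k).toNat
decreasing_by omega

theorem sieveOuterA_keep (N : Int) (m : Nat) (hnd : noSmallDiv m) (i : Int) (s : List Bool)
    (hi : 2 ≤ i) (h : s.getD m false = true) :
    (sieveOuterA N i s).getD m false = true := by
  rw [sieveOuterA]
  split
  · apply sieveOuterA_keep N m hnd (i + 1) _ (by omega)
    split
    · rw [sieveInnerA_unchanged N i hi m (i * i) (by positivity) s ?hno]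
      · exact h
      case hno =>
        rintro ⟨hc1, hc2⟩
        have hdvd : i ∣ (m : Int) := by
          have : (m : Int) = ((m : Int) - i * i) + i * (i : Int) := by ring
          rw [this]
          exact dvd_add hc2 (Dvd.intro _ rfl)
        have hi0 : i = ((i.toNat : Nat) : Int) := by omega
        rw [hi0] at hdvd hc1
        refine hnd i.toNat (by omega) ?_ (by exact_mod_cast hdvd)
        exact_mod_cast hc1
    · exact h
  · exact h
termination_by (N + 1 - i).toNat
decreasing_by
  rename_i h'
  have hii : i ≤ i * i := le_mul_of_one_le_left (by omega) (by omega)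
  omega

theorem sieveOuterA_kill (N : Int) (a m : Nat) (hnd : noSmallDiv a) (ha : 2 ≤ a)
    (ham : a ∣ m) (haa : a * a ≤ m) (hmN : (m : Int) ≤ N) (i : Int) (s : List Bool)
    (hi : 2 ≤ i) (hia : i ≤ (a : Int)) (hsa : s.getD a false = true) (hlen : m < s.length) :
    (sieveOuterA N i s).getD m false = false := by
  have hguard : i * i ≤ N := by
    have h1 : i * i ≤ (a : Int) * (a : Int) := by nlinarith
    have h2 : ((a * a : Nat) : Int) ≤ (m : Int) := by exact_mod_cast Nat.cast_le.mpr haa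
    push_cast at h2
    omega
  rw [sieveOuterA, dif_pos ⟨hguard, hi⟩]
  by_cases heq : i = (a : Int)
  · have hsi : s.getD i.toNat false = true := by
      rw [heq, Int.toNat_natCast]
      exact hsa
    rw [if_pos hsi]
    apply false_sieveOuterA
    rw [heq]
    apply sieveInnerA_hits N _ (by omega) m _ (by positivity) s ?h1 ?h2 hmN hlen
    case h1 =>
      have : ((a * a : Nat) : Int) ≤ (m : Int) := by exact_mod_cast Nat.cast_le.mpr haa
      push_cast at this
      omega
    case h2 =>
      rcases ham with ⟨t, ht⟩
      refine ⟨(t : Int) - (a : Int), ?_⟩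
      rw [ht]
      push_cast
      ring
  · apply sieveOuterA_kill N a m hnd ha ham haa hmN (i + 1) _ (by omega) (by omega) ?hsa'
    · split
      · simpa [length_sieveInnerA] using hlen
      · exact hlen
    case hsa' =>
      split
      · rw [sieveInnerA_unchanged N i hi a (i * i) (by positivity) s ?hno]
        · exact hsa
        case hno =>
          rintro ⟨hc1, hc2⟩
          have hdvd : i ∣ (a : Int) := by
            have : (a : Int) = ((a : Int) - i * i) + i * (i : Int) := by ring
            rw [this]
            exact dvd_add hc2 (Dvd.intro _ rfl)
          have hi0 : i = ((i.toNat : Nat) : Int) := by omega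
          rw [hi0] at hdvd hc1
          refine hnd i.toNat (by omega) ?_ (by exact_mod_cast hdvd)
          exact_mod_cast hc1
      · exact hsa
termination_by (N + 1 - i).toNat
decreasing_by
  have hii : i ≤ i * i := le_mul_of_one_le_left (by omega) (by omega)
  omega

theorem primeSieveA_true (N : Int) (m : Nat) (h2 : 2 ≤ m) (hlen : m < (N + 1).toNat)
    (hnd : noSmallDiv m) : (primeSieveA N).getD m false = true := by
  apply sieveOuterA_keep N m hnd 2 _ (by omega)
  rw [getD_set', getD_set']
  rw [if_neg (by rintro ⟨h', _⟩; omega), if_neg (by rintro ⟨h', _⟩; omega)]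
  exact List.getD_replicate _ (by simpa using hlen)

theorem primeSieveA_false (N : Int) (m d : Nat) (hd2 : 2 ≤ d) (hdd : d * d ≤ m)
    (hdvd : d ∣ m) (hmN : (m : Int) ≤ N) (hlen : m < (N + 1).toNat) :
    (primeSieveA N).getD m false = false := by
  have hm1 : m ≠ 1 := by nlinarith
  have hap : Nat.Prime m.minFac := Nat.minFac_prime hm1
  have hale : m.minFac ≤ d := Nat.minFac_le_of_dvd hd2 hdvd
  have haa : m.minFac * m.minFac ≤ m := le_trans (Nat.mul_le_mul hale hale) hdd
  have hand : noSmallDiv m.minFac := by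
    intro e he2 hee hedvd
    rcases hap.eq_one_or_self_of_dvd e hedvd with rfl | rfl
    · omega
    · nlinarith [hap.two_le]
  apply sieveOuterA_kill N m.minFac m hand hap.two_le (Nat.minFac_dvd m) haa hmN 2 _
    (by omega) (by exact_mod_cast hap.two_le) ?hsa (by simpa [length_primeSieveA] using hlen)
  case hsa =>
    rw [getD_set', getD_set']
    rw [if_neg (by rintro ⟨h', _⟩; have := hap.two_le; omega),
        if_neg (by rintro ⟨h', _⟩; have := hap.two_le; omega)]
    apply List.getD_replicate
    have : m.minFac ≤ m := le_trans (Nat.le_mul_of_pos_left _ (by have := hap.two_le; omega)) haa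
    omega

theorem flagged_prime (N : Int) (m : Nat) (h : (primeSieveA N).getD m false = true)
    (hmN : (m : Int) ≤ N) : Nat.Prime m := by
  have h2 : 2 ≤ m := by
    by_contra hc
    interval_cases m
    · rw [primeSieveA_zero] at h
      exact absurd h (by simp)
    · rw [primeSieveA_one] at h
      exact absurd h (by simp)
  by_contra hnp
  have hsq := Nat.minFac_sq_le_self (by omega) hnp
  have := primeSieveA_false N m m.minFac (Nat.minFac_prime (by omega)).two_le
    (by nlinarith [hsq]) (Nat.minFac_dvd m) hmN (by have := getD_true_lt _ _ h; rw [length_primeSieveA] at this; exact this)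
  rw [this] at h
  exact absurd h (by simp)

-- ---- Phase 6: what the divisor scan computes ----
theorem semiCheckB_iff (x : Int) (hx : 0 ≤ x) (s : List Bool) (p0 : Int) (hp0 : 2 ≤ p0)
    (hinv : ∀ e : Int, 2 ≤ e → e < p0 → ¬ e ∣ x) :
    (semiCheckB x s p0 = true ↔ ∃ d : Int, 2 ≤ d ∧ d * d ≤ x ∧ d ∣ x ∧
      (∀ e : Int, 2 ≤ e → e < d → ¬ e ∣ x) ∧
      s.getD (PySem.Int.floordiv x d).toNat false = true) := by
  rw [semiCheckB]
  by_cases hg : p0 * p0 ≤ x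
  · rw [dif_pos ⟨hg, hp0⟩]
    by_cases hm : PySem.Int.mod x p0 = 0
    · rw [if_pos (by simpa using hm)]
      rw [PySem.Int.mod_eq_zero_iff_dvd] at hm
      constructor
      · intro h
        exact ⟨p0, hp0, hg, hm, hinv, h⟩
      · rintro ⟨d, hd2, hdd, hdvd, hmin, hs⟩
        have hdp : d = p0 := by
          rcases lt_trichotomy d p0 with hlt | heq | hgt
          · exact absurd hdvd (hinv d hd2 hlt)
          · exact heq
          · exact absurd hm (hmin p0 hp0 hgt)
        rw [hdp] at hs
        exact hs
    · rw [if_neg (by simpa using hm)]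
      rw [PySem.Int.mod_eq_zero_iff_dvd] at hm
      rw [semiCheckB_iff x hx s (p0 + 1) (by omega) ?hinv']
      case hinv' =>
        intro e he2 helt
        rcases lt_or_ge e p0 with h' | h'
        · exact hinv e he2 h'
        · have : e = p0 := by omega
          rw [this]
          exact hm
  · rw [dif_neg (fun hcc => hg hcc.1)]
    constructor
    · intro h
      exact absurd h (by simp)
    · rintro ⟨d, hd2, hdd, hdvd, hmin, hs⟩
      exfalso
      have hdp : p0 ≤ d := by
        by_contra hc
        exact hinv d hd2 (by omega) hdvd
      nlinarith
termination_by (x + 1 - p0).toNat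
decreasing_by
  have hself : p0 ≤ p0 * p0 := le_mul_of_one_le_left (by omega) (by omega)
  omega

-- ---- Phase 7: the two per-number flags agree ----
theorem flags_eq (N : Int) (hN : 1 ≤ N) (x : Nat) (hx : x < (N + 1).toNat) :
    ((pairOuterA N (collectPrimesA (primeSieveA N)) 0
        (List.replicate (N + 1).toNat false)).getD x false) =
      (!((primeSieveA N).getD x false) && semiCheckB (x : Int) (primeSieveA N) 2) := by
  have hslen : (primeSieveA N).length = (N + 1).toNat := length_primeSieveA N
  have hsort := collectPrimesA_sorted (primeSieveA N)
  have hmem : ∀ q : Nat, q ∈ collectPrimesA (primeSieveA N) ↔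
      (q < (N + 1).toNat ∧ (primeSieveA N).getD q false = true) := by
    intro q
    rw [mem_collectPrimesA, hslen]
  rw [← Bool.coe_iff_coe]
  have hL : ((pairOuterA N (collectPrimesA (primeSieveA N)) 0
        (List.replicate (N + 1).toNat false)).getD x false = true) ↔
      ∃ p q : Nat, p ∈ collectPrimesA (primeSieveA N) ∧ q ∈ collectPrimesA (primeSieveA N) ∧
        p ≤ q ∧ p * q = x := by
    rw [pairOuterA_getD N _ hsort x 0 _ (by simpa using hx)]
    have hrep : (List.replicate (N + 1).toNat false).getD x false = false :=
      List.getD_replicate _ hx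
    rw [hrep]
    constructor
    · rintro (h | ⟨i, j, _, hij, hjlen, hle, heq⟩)
      · exact absurd h (by simp)
      · have hilen : i < (collectPrimesA (primeSieveA N)).length := by omega
        refine ⟨(collectPrimesA (primeSieveA N)).getD i 0,
                (collectPrimesA (primeSieveA N)).getD j 0, ?_, ?_, ?_, heq⟩
        · rw [List.getD_eq_getElem _ _ hilen]
          exact List.getElem_mem hilen
        · rw [List.getD_eq_getElem _ _ hjlen]
          exact List.getElem_mem hjlen
        · exact sorted_getD_mono _ hsort i j hij hjlen
    · rintro ⟨p, q, hp, hq, hpq, heq⟩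
      right
      obtain ⟨i, hi, hpi⟩ := List.mem_iff_getElem.mp hp
      obtain ⟨j, hj, hqj⟩ := List.mem_iff_getElem.mp hq
      have hij : i ≤ j := by
        by_contra hc
        have := List.pairwise_iff_getElem.mp hsort j i hj hi (by omega)
        omega
      have hgi : (collectPrimesA (primeSieveA N)).getD i 0 = p := by
        rw [List.getD_eq_getElem _ _ hi, hpi]
      have hgj : (collectPrimesA (primeSieveA N)).getD j 0 = q := by
        rw [List.getD_eq_getElem _ _ hj, hqj]
      refine ⟨i, j, by omega, hij, hj, ?_, ?_⟩
      · rw [hgi, hgj, heq]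
        omega
      · rw [hgi, hgj, heq]
  rw [hL]
  rw [Bool.and_eq_true, Bool.not_eq_eq_eq_not, Bool.not_true]
  rw [semiCheckB_iff (x : Int) (by omega) _ 2 (le_refl 2) (by intro e he1 he2 _; omega)]
  constructor
  · rintro ⟨p, q, hp, hq, hpq, heq⟩
    obtain ⟨hplen, hpt⟩ := (hmem p).mp hp
    obtain ⟨hqlen, hqt⟩ := (hmem q).mp hq
    have hpp : Nat.Prime p := flagged_prime N p hpt (by omega)
    have hqp : Nat.Prime q := flagged_prime N q hqt (by omega)
    have hp2 := hpp.two_le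
    have hq2 := hqp.two_le
    constructor
    · exact primeSieveA_false N x p hp2 (by nlinarith) ⟨q, heq.symm⟩ (by omega) hx
    · have hx1 : x ≠ 1 := by nlinarith
      have hmf : Nat.Prime x.minFac := Nat.minFac_prime hx1
      have hcases : x.minFac = p ∨ x.minFac = q := by
        have hdvd : x.minFac ∣ p * q := heq ▸ Nat.minFac_dvd x
        rcases (hmf.dvd_mul).mp hdvd with h' | h'
        · exact Or.inl ((Nat.prime_dvd_prime_iff_eq hmf hpp).mp h')
        · exact Or.inr ((Nat.prime_dvd_prime_iff_eq hmf hqp).mp h')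
      have hmle : x.minFac ≤ p := Nat.minFac_le_of_dvd hp2 ⟨q, heq.symm⟩
      refine ⟨(x.minFac : Int), by exact_mod_cast hmf.two_le, ?_, ?_, ?_, ?_⟩
      · have : x.minFac * x.minFac ≤ x := by nlinarith
        exact_mod_cast this
      · exact_mod_cast Nat.minFac_dvd x
      · intro e he2 helt hedvd
        obtain ⟨E, rfl⟩ := Int.eq_ofNat_of_zero_le (by omega : (0 : Int) ≤ e)
        have hE : E ∣ x := by exact_mod_cast hedvd
        have := Nat.minFac_le_of_dvd (by exact_mod_cast he2) hE
        omega
      · rw [PySem.Int.floordiv_natCast, Int.toNat_natCast]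
        rcases hcases with hc | hc
        · rw [hc]
          have : x / p = q := by
            rw [← heq, Nat.mul_div_cancel_left q (by omega)]
          rw [this]
          exact hqt
        · rw [hc]
          have : x / q = p := by
            rw [← heq, Nat.mul_div_cancel p (by omega)]
          rw [this]
          exact hpt
  · rintro ⟨hxf, d, hd2, hdd, hdvd, hmin, hs⟩
    obtain ⟨P, rfl⟩ := Int.eq_ofNat_of_zero_le (by omega : (0 : Int) ≤ d)
    have hP2 : 2 ≤ P := by exact_mod_cast hd2
    have hPdvd : P ∣ x := by exact_mod_cast hdvd
    have hPP : P * P ≤ x := by exact_mod_cast hdd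
    rw [PySem.Int.floordiv_natCast, Int.toNat_natCast] at hs
    have hQlen : x / P < (N + 1).toNat := by
      have := getD_true_lt _ _ hs
      omega
    have hPnd : noSmallDiv P := by
      intro e he2 hee hedvd
      have heP : e < P := by nlinarith
      have hex : e ∣ x := dvd_trans hedvd hPdvd
      exact hmin (e : Int) (by exact_mod_cast he2) (by exact_mod_cast heP)
        (by exact_mod_cast hex)
    have hPlen : P < (N + 1).toNat := by
      have : P ≤ x := le_trans (Nat.le_mul_of_pos_left _ (by omega)) hPP
      omega
    have hPt : (primeSieveA N).getD P false = true := primeSieveA_true N P hP2 hPlen hPnd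
    refine ⟨P, x / P, (hmem P).mpr ⟨hPlen, hPt⟩, (hmem (x / P)).mpr ⟨hQlen, hs⟩, ?_, ?_⟩
    · have hmul : P * (x / P) = x := Nat.mul_div_cancel' hPdvd
      have hmm : P * P ≤ P * (x / P) := by
        rw [hmul]
        exact hPP
      exact Nat.le_of_mul_le_mul_left hmm (by omega)
    · exact Nat.mul_div_cancel' hPdvd

-- ---- Phase 8: assembly ----
theorem outLoopB_eq (N : Int) (t : List Bool) (l : List Bool) (x count : Int) (hx : 0 ≤ x)
    (hlen : x + (l.length : Int) = N + 1)
    (hflag : ∀ d : Nat, d < l.length →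
      l.getD d false = (!(t.getD (x + (d : Int)).toNat false) && semiCheckB (x + (d : Int)) t 2)) :
    prefixCountA count l = outLoopB N t x count := by
  match l with
  | [] =>
    rw [outLoopB, dif_neg (by simp at hlen; omega)]
    rfl
  | b :: rest =>
    rw [outLoopB, dif_pos (by simp at hlen; omega)]
    have hb : b = (!(t.getD x.toNat false) && semiCheckB x t 2) := by
      have h0 := hflag 0 (by simp)
      simpa using h0
    have htail : ∀ d : Nat, d < rest.length →
        rest.getD d false = (!(t.getD (x + 1 + (d : Int)).toNat false)
          && semiCheckB (x + 1 + (d : Int)) t 2) := by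
      intro d hd
      have h1 := hflag (d + 1) (by simp; omega)
      simp only [List.getD_cons_succ] at h1
      rw [h1]
      have harith : x + ((d : Int) + 1) = x + 1 + (d : Int) := by ring
      push_cast
      rw [harith]
    rw [prefixCountA, hb]
    simp only []
    congr 1
    exact outLoopB_eq N t rest (x + 1) _ (by omega) (by simp at hlen ⊢; omega) htail
termination_by l.length

-- ===== VERDICT (by name: the statement is the Claim_ definition above) =====
theorem partialSemiprime_spec : Claim_equal_partialSemiprime := by
  intro N _ hN
  have hN1 : 1 ≤ N := hN
  unfold Spec_partialSemiprime
  simp only [partialSemiprime, partialSemiprime_alt, sieveB_eq]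
  refine outLoopB_eq N (primeSieveA N) _ 0 0 (le_refl 0) ?_ ?_
  · rw [length_pairOuterA, List.length_replicate]
    omega
  · intro d hd
    rw [length_pairOuterA, List.length_replicate] at hd
    rw [show (0 : Int) + (d : Int) = (d : Int) by ring, Int.toNat_natCast]
    exact flags_eq N hN1 d hd
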